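-- pv_equiv track=rewrite | github.com/EXUPLOOOOSION/text-to-layout | Spatial CommonSense Test/results_stats.py | select_highest_size
-- ===== SOURCE A (Python) =====
-- def select_highest_size(result, class1, class2):
--     """
--      returns the index of the bboxs with class1 and class2 with the highest size for each class.
--      example:
--      class1: 1 class2: 4
--      classes:   [0, 2, 4, 6, 1 , 4, 0, 1, 2]
--      sizes:     [5, 1, 2, 4, 56, 6, 7, 8, 9]
--      returns: 4, 5
--     """
--     highest_size1 = 0
--     highest_size2 = 0
--     index1 = None
--     index2 = None
--     sizes = result['sizes']
--     classes = result['classes']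
--     for i in range(len(sizes)):
--         if classes[i] == class1 and sizes[i]>highest_size1:
--             index1=i
--             highest_size1 = sizes[i]
--         if classes[i] == class2 and sizes[i]>highest_size2:
--             index2=i
--             highest_size2 = sizes[i]
--     return index1, index2
-- ===== SOURCE B (Python) =====
-- def select_highest_size(result, class1, class2):
--     sizes = result['sizes']
--     classes = result['classes']
--
--     def argmax_for(c):
--         candidates = [i for i in range(len(sizes)) if classes[i] == c and sizes[i] > 0]
--         return max(candidates, key=lambda i: sizes[i], default=None)
--
--     return argmax_for(class1), argmax_for(class2)
-- ===== Notes on version B (the rewrite author's own statement) =====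
-- stated objective: alternative
-- what changed: Replaces A's single fused loop with four mutable accumulators by two independent filtered argmax reductions (filter positive-size indices of the class, then max by size, first maximum wins).
import Mathlib
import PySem

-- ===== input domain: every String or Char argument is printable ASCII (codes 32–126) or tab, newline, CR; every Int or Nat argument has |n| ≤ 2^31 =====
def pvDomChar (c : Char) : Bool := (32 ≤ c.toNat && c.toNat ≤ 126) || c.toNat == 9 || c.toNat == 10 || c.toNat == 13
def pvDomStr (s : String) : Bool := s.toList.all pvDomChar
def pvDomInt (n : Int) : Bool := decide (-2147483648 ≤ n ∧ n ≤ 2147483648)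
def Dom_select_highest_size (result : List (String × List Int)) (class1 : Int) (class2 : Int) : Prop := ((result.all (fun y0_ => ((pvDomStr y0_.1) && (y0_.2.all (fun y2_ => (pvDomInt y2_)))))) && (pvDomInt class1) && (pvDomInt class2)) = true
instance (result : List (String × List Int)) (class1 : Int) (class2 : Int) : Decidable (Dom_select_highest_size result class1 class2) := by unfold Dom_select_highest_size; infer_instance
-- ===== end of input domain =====

-- B replaces A's single fused loop (four mutable accumulators) by two independent
-- filtered argmax reductions (one per class); alternative decomposition, same cost.

-- ===== PORT A =====
-- one iteration of A's loop body for one class: 'if classes[i]==c and sizes[i]>highest: …'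
def pvStep1 (classes sizes : List Int) (c : Int) (st : Int × Option Int) (i : Int) : Int × Option Int :=
  if PySem.List.pyGetD classes i 0 == c && decide (st.1 < PySem.List.pyGetD sizes i 0)
  then (PySem.List.pyGetD sizes i 0, some i) else st

def select_highest_size (result : List (String × List Int)) (class1 : Int) (class2 : Int) : Option Int × Option Int :=
  let sizes := (result.lookup "sizes").getD []
  let classes := (result.lookup "classes").getD []
  let st := (PySem.List.pyRange 0 sizes.length 1).foldl
    (fun st i => (pvStep1 classes sizes class1 st.1 i, pvStep1 classes sizes class2 st.2 i))
    ((0, none), (0, none))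
  (st.1.2, st.2.2)

-- ===== PORT B =====
-- max((i for i in range(len(sizes)) if classes[i]==c and sizes[i]>0), key=lambda i: sizes[i], default=None)
def pvArgmaxFor (sizes classes : List Int) (c : Int) : Option Int :=
  PySem.List.max?
    ((PySem.List.pyRange 0 sizes.length 1).filter
      (fun i => PySem.List.pyGetD classes i 0 == c && decide (0 < PySem.List.pyGetD sizes i 0)))
    (fun i => PySem.List.pyGetD sizes i 0)

def select_highest_size_alt (result : List (String × List Int)) (class1 : Int) (class2 : Int) : Option Int × Option Int :=
  let sizes := (result.lookup "sizes").getD []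
  let classes := (result.lookup "classes").getD []
  (pvArgmaxFor sizes classes class1, pvArgmaxFor sizes classes class2)

-- ===== PRECONDITION & SPEC =====
-- Pre_ excludes exactly the inputs on which the Python A raises: a missing 'sizes' or
-- 'classes' key (KeyError) or classes shorter than sizes (IndexError on classes[i]).
def Pre_select_highest_size (result : List (String × List Int)) (class1 : Int) (class2 : Int) : Prop :=
  (result.lookup "sizes").isSome ∧ (result.lookup "classes").isSome ∧
  ((result.lookup "sizes").getD []).length ≤ ((result.lookup "classes").getD []).length
instance (result : List (String × List Int)) (class1 : Int) (class2 : Int) : Decidable (Pre_select_highest_size result class1 class2) := by unfold Pre_select_highest_size; infer_instance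

def pvWitness_select_highest_size : (List (String × List Int)) × Int × Int :=
  ([("sizes", [5, 1, 2]), ("classes", [0, 1, 0])], 0, 1)

def Spec_select_highest_size (result : List (String × List Int)) (class1 : Int) (class2 : Int) (out : Option Int × Option Int) : Prop := out = select_highest_size_alt result class1 class2
instance (result : List (String × List Int)) (class1 : Int) (class2 : Int) (out : Option Int × Option Int) : Decidable (Spec_select_highest_size result class1 class2 out) := by unfold Spec_select_highest_size; infer_instance

-- ===== CLAIM (what is proved, stated in full; the proofs are below) =====
def Claim_equal_select_highest_size : Prop := ∀ (result : List (String × List Int)) (class1 : Int) (class2 : Int), Dom_select_highest_size result class1 class2 → Pre_select_highest_size result class1 class2 → Spec_select_highest_size result class1 class2 (select_highest_size result class1 class2)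

-- ===== LEMMAS AND PROOFS =====

-- the fold step of PySem.List.max? with key (fun i => sizes[i])
def pvMaxStep (sizes : List Int) (acc : Option Int) (i : Int) : Option Int :=
  match acc with
  | none => some i
  | some m => if PySem.List.pyGetD sizes m 0 < PySem.List.pyGetD sizes i 0 then some i else some m

-- invariant linking A's (highest, index) accumulator to B's running maximum
def pvRel (sizes : List Int) (h : Int) (idx : Option Int) : Prop :=
  (idx = none ∧ h = 0) ∨ (∃ j, idx = some j ∧ h = PySem.List.pyGetD sizes j 0 ∧ 0 < h)

theorem pvCore (classes sizes : List Int) (c : Int) (l : List Int) :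
    ∀ (h : Int) (idx : Option Int), pvRel sizes h idx →
      (l.foldl (pvStep1 classes sizes c) (h, idx)).2
        = (l.filter
            (fun i => PySem.List.pyGetD classes i 0 == c && decide (0 < PySem.List.pyGetD sizes i 0))).foldl
            (pvMaxStep sizes) idx := by
  induction l with
  | nil => intro h idx _; simp
  | cons i l ih =>
    intro h idx hrel
    by_cases hc : PySem.List.pyGetD classes i 0 = c
    · rcases hrel with ⟨hidx, hh⟩ | ⟨j, hidx, hh, hpos⟩
      · subst hidx hh
        by_cases hs : 0 < PySem.List.pyGetD sizes i 0
        · simp only [List.foldl_cons, List.filter_cons, pvStep1, pvMaxStep, hc, hs,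
            beq_self_eq_true, Bool.true_and, decide_true, if_true]
          exact ih _ _ (Or.inr ⟨i, rfl, rfl, hs⟩)
        · simp only [List.foldl_cons, List.filter_cons, pvStep1, pvMaxStep, hc,
            beq_self_eq_true, Bool.true_and, decide_eq_true_eq, hs, decide_false,
            Bool.and_false, if_false, ite_false]
          exact ih _ _ (Or.inl ⟨rfl, rfl⟩)
      · subst hidx hh
        by_cases hs : PySem.List.pyGetD sizes j 0 < PySem.List.pyGetD sizes i 0
        · have hs0 : (0:Int) < PySem.List.pyGetD sizes i 0 := lt_trans hpos hs
          simp only [List.foldl_cons, List.filter_cons, pvStep1, pvMaxStep, hc, hs, hs0,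
            beq_self_eq_true, Bool.true_and, decide_true, if_true]
          exact ih _ _ (Or.inr ⟨i, rfl, rfl, hs0⟩)
        · by_cases hs0 : 0 < PySem.List.pyGetD sizes i 0
          · simp only [List.foldl_cons, List.filter_cons, pvStep1, pvMaxStep, hc, hs, hs0,
              beq_self_eq_true, Bool.true_and, decide_true, decide_false, if_true, if_false,
              ite_false]
            exact ih _ _ (Or.inr ⟨j, rfl, rfl, hpos⟩)
          · simp only [List.foldl_cons, List.filter_cons, pvStep1, pvMaxStep, hc, hs, hs0,
              beq_self_eq_true, Bool.true_and, decide_false, Bool.and_false, if_false,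
              ite_false]
            exact ih _ _ (Or.inr ⟨j, rfl, rfl, hpos⟩)
    · have hcb : (PySem.List.pyGetD classes i 0 == c) = false := by
        exact beq_eq_false_iff_ne.mpr hc
      simp only [List.foldl_cons, List.filter_cons, pvStep1, hcb, Bool.false_and, if_false,
        ite_false]
      exact ih _ _ hrel

theorem pvArgmaxFor_eq (classes sizes : List Int) (c : Int) :
    ((PySem.List.pyRange 0 sizes.length 1).foldl (pvStep1 classes sizes c) (0, none)).2
      = pvArgmaxFor sizes classes c := by
  have h := pvCore classes sizes c (PySem.List.pyRange 0 sizes.length 1) 0 none (Or.inl ⟨rfl, rfl⟩)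
  unfold pvArgmaxFor PySem.List.max?
  rw [h]
  congr 1
  funext acc i
  cases acc <;> rfl

-- ===== VERDICT (by name: the statement is the Claim_ definition above) =====
theorem select_highest_size_spec : Claim_equal_select_highest_size := by
  intro result class1 class2 _ _
  show _ = _
  unfold select_highest_size select_highest_size_alt
  simp only [PySem.List.foldl_prod_mk]
  rw [pvArgmaxFor_eq, pvArgmaxFor_eq]
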